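-- pv_equiv track=rewrite | github.com/mbjackson-capp/everybodycodes | song/q11.py | advance_simulation
-- ===== SOURCE A (Python) =====
-- from typing import List, Tuple
-- from copy import deepcopy
-- from math import ceil
--
-- def find_donors_and_recipients(flock: List[int]) -> Tuple[List[int], List[int]]:
--     """Assuming that serial bird transfer steps within a round continue to push
--     the same bird from one column to the next until that bird reaches a column
--     of smaller size than the one to its right (or failing that, the last column),
--     find the column indices from which a bird transfer must start (donors)
--     and the column indices at which a bird transfer must end (recipients)."""
--     donor_ixs = []
--     recipient_ixs = []
--     to_find_next = "donor"
--     for i, col in enumerate(flock):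
--         try:
--             if to_find_next == "donor" and col > flock[i + 1]:
--                 donor_ixs.append(i)
--                 to_find_next = "recipient"
--             elif to_find_next == "recipient" and col < flock[i + 1]:
--                 recipient_ixs.append(i)
--                 to_find_next = "donor"
--         except IndexError:  # very last index
--             if to_find_next == "recipient":
--                 recipient_ixs.append(i)
--     return donor_ixs, recipient_ixs
--
-- def num_rounds_to_skip(flock: List[int]) -> int:
--     gaps = []
--     donors, recipients = find_donors_and_recipients(flock)
--     # you have to do the logic both ways
--     for r in recipients:
--         if r - 1 in donors:
--             # receiving from neighbor, so cut gap in half to find balancing point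
--             gaps.append(ceil((flock[r - 1] - flock[r]) / 2))
--         else:
--             # this stops being a donor when its size strictly exceeds left neighbor's
--             gaps.append(flock[r - 1] - flock[r] + 1)  # the +1 might be wrong sometimes
--     for d in donors:
--         if (d - 1 >= 0) and flock[d - 1] == flock[d]:
--             gaps.append(1)
--         if d + 1 in recipients:
--             # donating to neighbor, so cut gap in half to find balancing point
--             gaps.append(ceil((flock[d] - flock[d + 1]) / 2))
--         else:
--             # this stops being a donor when its size diminishes to right neighbor's
--             gaps.append(flock[d] - flock[d + 1])
--     return 0 if not gaps else min(gaps)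
--
-- def advance_simulation(old_round_num: int, flock: List[int]) -> Tuple[int, List[int]]:
--     """"""
--     # TODO: reorganize to prevent redundant call to find_donors_and_recipients()
--     # TODO: you could do something in here to check if new_rds would take old_round_num
--     # over 10. if it does, take it to exactly round 10 instead.
--     flock = deepcopy(flock)
--     new_rds = num_rounds_to_skip(flock)
--     donors, recipients = find_donors_and_recipients(flock)
--     for d in donors:
--         flock[d] -= new_rds
--     for r in recipients:
--         flock[r] += new_rds
--     new_round_num = old_round_num + new_rds
--     return new_round_num, flock
-- ===== SOURCE B (Python) =====
-- def advance_simulation(old_round_num, flock):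
--     n = len(flock)
--     # Run-length encode the nonzero signs of adjacent differences:
--     # one (sign, first_index) entry per maximal run of equal nonzero sign.
--     events = []
--     for i in range(n - 1):
--         s = (flock[i + 1] > flock[i]) - (flock[i + 1] < flock[i])
--         if s != 0 and (not events or events[-1][0] != s):
--             events.append((s, i))
--     # Runs strictly alternate in sign, so every falling run starts a donor at its
--     # first index, matched with the next run's first index (or the last column)
--     # as its recipient.
--     pairs = [(i, nxt) for (s, i), (_, nxt) in zip(events, events[1:] + [(1, n - 1)])
--              if s < 0]
--     gaps = []
--     for d, r in pairs:
--         if r == d + 1: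
--             half = -((flock[r] - flock[d]) // 2)  # = ceil((flock[d] - flock[r]) / 2)
--             gaps.append(half)
--             if d > 0 and flock[d - 1] == flock[d]:
--                 gaps.append(1)
--             gaps.append(half)
--         else:
--             gaps.append(flock[r - 1] - flock[r] + 1)
--             if d > 0 and flock[d - 1] == flock[d]:
--                 gaps.append(1)
--             gaps.append(flock[d] - flock[d + 1])
--     delta = min(gaps, default=0)
--     off = {}
--     for d, r in pairs:
--         off[d] = -delta
--         off[r] = delta
--     return old_round_num + delta, [v + off.get(i, 0) for i, v in enumerate(flock)]
-- ===== Notes on version B (the rewrite author's own statement) =====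
-- stated objective: faster
-- what changed: B replaces A's donor/recipient state machine plus quadratic 'in donors'/'in recipients' list scans by a run-length encoding of the nonzero adjacent-difference signs: since runs strictly alternate, each falling run's first index is a donor paired by a shifted zip with the next run's first index (or the last column) as its recipient, gaps come from each pair directly, and the delta is applied via an offset dict in one comprehension.
import Mathlib
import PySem

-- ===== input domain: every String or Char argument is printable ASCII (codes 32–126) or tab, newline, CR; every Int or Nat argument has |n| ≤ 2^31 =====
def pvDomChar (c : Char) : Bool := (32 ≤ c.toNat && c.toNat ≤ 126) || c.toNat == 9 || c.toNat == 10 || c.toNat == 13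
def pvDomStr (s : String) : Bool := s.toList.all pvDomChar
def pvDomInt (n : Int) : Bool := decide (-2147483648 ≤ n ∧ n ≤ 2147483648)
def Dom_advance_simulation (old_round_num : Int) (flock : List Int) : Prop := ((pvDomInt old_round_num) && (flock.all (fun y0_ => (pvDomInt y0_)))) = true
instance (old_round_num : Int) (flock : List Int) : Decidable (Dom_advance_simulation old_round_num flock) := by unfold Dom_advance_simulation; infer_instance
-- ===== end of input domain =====

-- B replaces A's donor/recipient state machine and its quadratic 'in donors'/'in recipients'
-- list scans by a run-length encoding of the nonzero adjacent-difference signs: runs strictly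
-- alternate, so each falling run's first index (a donor) is paired by a shifted zip with the
-- next run's first index (or the last column) as its recipient; gaps come from each pair and
-- the delta is applied through an offset dict. Same return value everywhere.

-- ===== PORT A =====
-- math.ceil(x / 2) for int x: exact as -((-x) // 2) since |x| ≤ 2^33 < 2^53 on Dom
def pvCeilHalfA (x : Int) : Int := -(PySem.Int.floordiv (-x) 2)

-- loop body of find_donors_and_recipients (state: donor_ixs, recipient_ixs, to_find_next)
def pvFdrStep (flock : List Int) (st : List Int × List Int × String) (p : Int × Int) :
    List Int × List Int × String :=
  match PySem.List.pyGet? flock (p.1 + 1) with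
  | some nxt =>
    if st.2.2 == "donor" && decide (p.2 > nxt) then (st.1 ++ [p.1], st.2.1, "recipient")
    else if st.2.2 == "recipient" && decide (p.2 < nxt) then (st.1, st.2.1 ++ [p.1], "donor")
    else st
  | none =>  -- IndexError at the very last index
    if st.2.2 == "recipient" then (st.1, st.2.1 ++ [p.1], st.2.2) else st

def find_donors_and_recipients (flock : List Int) : List Int × List Int :=
  let r := (PySem.List.enumerate flock 0).foldl (pvFdrStep flock) ([], [], "donor")
  (r.1, r.2.1)

-- indices fed to pyGetD below are always in range when reached, so the default is inert
def num_rounds_to_skip (flock : List Int) : Int :=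
  let dr := find_donors_and_recipients flock
  let gaps1 := dr.2.foldl (fun acc r =>
    if dr.1.contains (r - 1) then
      acc ++ [pvCeilHalfA (PySem.List.pyGetD flock (r - 1) 0 - PySem.List.pyGetD flock r 0)]
    else
      acc ++ [PySem.List.pyGetD flock (r - 1) 0 - PySem.List.pyGetD flock r 0 + 1]) []
  let gaps2 := dr.1.foldl (fun acc d =>
    let acc1 := if 0 ≤ d - 1 ∧ PySem.List.pyGetD flock (d - 1) 0 = PySem.List.pyGetD flock d 0
      then acc ++ [(1 : Int)] else acc
    if dr.2.contains (d + 1) then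
      acc1 ++ [pvCeilHalfA (PySem.List.pyGetD flock d 0 - PySem.List.pyGetD flock (d + 1) 0)]
    else
      acc1 ++ [PySem.List.pyGetD flock d 0 - PySem.List.pyGetD flock (d + 1) 0]) gaps1
  match gaps2 with
  | [] => 0
  | h :: t => t.foldl min h  -- min(gaps)

def advance_simulation (old_round_num : Int) (flock : List Int) : Int × List Int :=
  let new_rds := num_rounds_to_skip flock
  let dr := find_donors_and_recipients flock
  let fl1 := dr.1.foldl (fun fl d =>
    PySem.List.pySetD fl d (PySem.List.pyGetD fl d 0 - new_rds)) flock
  let fl2 := dr.2.foldl (fun fl r =>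
    PySem.List.pySetD fl r (PySem.List.pyGetD fl r 0 + new_rds)) fl1
  (old_round_num + new_rds, fl2)

-- ===== PORT B =====
-- (flock[i+1] > flock[i]) - (flock[i+1] < flock[i]) : the sign of the i-th adjacent difference
def pvSig (flock : List Int) (i : Int) : Int :=
  (if PySem.List.pyGetD flock (i + 1) 0 > PySem.List.pyGetD flock i 0 then 1 else 0)
  - (if PySem.List.pyGetD flock (i + 1) 0 < PySem.List.pyGetD flock i 0 then 1 else 0)

-- loop body of B's run-length encoder; the getD default on events[-1] is inert (guarded by nonemptiness)
def pvEvStep (flock : List Int) (evs : List (Int × Int)) (i : Int) : List (Int × Int) :=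
  let s := pvSig flock i
  if s ≠ 0 ∧ (evs = [] ∨ ((evs.getLast?).getD ((0 : Int), (0 : Int))).1 ≠ s) then
    evs ++ [(s, i)]
  else evs

-- loop body of B's per-pair gap accumulation
def pvGapStep (flock : List Int) (acc : List Int) (p : Int × Int) : List Int :=
  if p.2 = p.1 + 1 then
    let half := -(PySem.Int.floordiv (PySem.List.pyGetD flock p.2 0 - PySem.List.pyGetD flock p.1 0) 2)
    ((acc ++ [half]) ++
      (if p.1 > 0 ∧ PySem.List.pyGetD flock (p.1 - 1) 0 = PySem.List.pyGetD flock p.1 0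
       then [(1 : Int)] else [])) ++ [half]
  else
    ((acc ++ [PySem.List.pyGetD flock (p.2 - 1) 0 - PySem.List.pyGetD flock p.2 0 + 1]) ++
      (if p.1 > 0 ∧ PySem.List.pyGetD flock (p.1 - 1) 0 = PySem.List.pyGetD flock p.1 0
       then [(1 : Int)] else [])) ++
      [PySem.List.pyGetD flock p.1 0 - PySem.List.pyGetD flock (p.1 + 1) 0]

def advance_simulation_alt (old_round_num : Int) (flock : List Int) : Int × List Int :=
  let n := PySem.List.len flock
  let events := (PySem.List.pyRange 0 (n - 1) 1).foldl (pvEvStep flock) []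
  let pairs := (events.zip (PySem.List.slice events (some 1) none ++ [((1 : Int), n - 1)])).foldl
    (fun acc q => if q.1.1 < 0 then acc ++ [(q.1.2, q.2.2)] else acc) ([] : List (Int × Int))
  let gaps := pairs.foldl (pvGapStep flock) []
  let delta := PySem.List.minD gaps (fun y => y) 0  -- min(gaps, default=0)
  let off := pairs.foldl
    (fun (d : PySem.Dict Int Int) q => (d.insert q.1 (-delta)).insert q.2 delta)
    PySem.Dict.empty
  (old_round_num + delta,
   (PySem.List.enumerate flock 0).map (fun q => q.2 + off.getD q.1 0))

-- ===== PRECONDITION & SPEC =====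
def Spec_advance_simulation (old_round_num : Int) (flock : List Int) (out : Int × List Int) : Prop := out = advance_simulation_alt old_round_num flock
instance (old_round_num : Int) (flock : List Int) (out : Int × List Int) : Decidable (Spec_advance_simulation old_round_num flock out) := by unfold Spec_advance_simulation; infer_instance

-- ===== CLAIM (what is proved, stated in full; the proofs are below) =====
def Claim_equal_advance_simulation : Prop := ∀ (old_round_num : Int) (flock : List Int), Dom_advance_simulation old_round_num flock → Spec_advance_simulation old_round_num flock (advance_simulation old_round_num flock)

-- ===== LEMMAS AND PROOFS =====

-- A's state machine restated as a boolean-mode scan (proof-side specification)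
def pvScanStep (flock : List Int) (st : List Int × List Int × Bool) (i : Int) :
    List Int × List Int × Bool :=
  if st.2.2 then
    if i + 1 < PySem.List.len flock ∧
        PySem.List.pyGetD flock i 0 > PySem.List.pyGetD flock (i + 1) 0 then
      (st.1 ++ [i], st.2.1, false)
    else st
  else
    if PySem.List.len flock ≤ i + 1 ∨
        PySem.List.pyGetD flock i 0 < PySem.List.pyGetD flock (i + 1) 0 then
      (st.1, st.2.1 ++ [i], true)
    else st

-- the scan started at index i in state b, from empty accumulators
def pvRun (flock : List Int) (i : Int) (b : Bool) : List Int × List Int × Bool :=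
  (PySem.List.pyRange i (PySem.List.len flock) 1).foldl (pvScanStep flock) ([], [], b)

-- the interleaving invariant: D = [d1,…,dk], R = [r1,…,rk] with lb ≤ d1 < r1 < d2 < r2 < …
inductive pvInter : Int → List Int → List Int → Prop
  | nil (lb : Int) : pvInter lb [] []
  | cons {lb d r : Int} {D R : List Int} :
      lb ≤ d → d < r → pvInter (r + 1) D R → pvInter lb (d :: D) (r :: R)

lemma pvInter_mono {lb lb' : Int} {D R : List Int} (h : lb' ≤ lb) (hI : pvInter lb D R) :
    pvInter lb' D R := by
  cases hI with
  | nil => exact pvInter.nil lb'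
  | cons h1 h2 h3 => exact pvInter.cons (le_trans h h1) h2 h3

lemma pvInter_bounds {lb : Int} {D R : List Int} (hI : pvInter lb D R) :
    (∀ x ∈ D, lb ≤ x) ∧ (∀ x ∈ R, lb < x) := by
  induction hI with
  | nil => simp
  | cons h1 h2 _ ih =>
    constructor
    · intro x hx; rcases List.mem_cons.mp hx with rfl | hx
      · exact h1
      · have := ih.1 x hx; omega
    · intro x hx; rcases List.mem_cons.mp hx with rfl | hx
      · omega
      · have := ih.2 x hx; omega

lemma pvInter_length {lb : Int} {D R : List Int} (hI : pvInter lb D R) :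
    D.length = R.length := by
  induction hI with
  | nil => rfl
  | cons _ _ _ ih => simp [ih]

lemma pvInter_pairwise {lb : Int} {D R : List Int} (hI : pvInter lb D R) :
    D.Pairwise (· < ·) ∧ R.Pairwise (· < ·) ∧ ∀ d ∈ D, ∀ r ∈ R, d ≠ r := by
  induction hI with
  | nil => simp
  | cons h1 h2 h3 ih =>
    obtain ⟨hb1, hb2⟩ := pvInter_bounds h3
    refine ⟨List.pairwise_cons.mpr ⟨?_, ih.1⟩, List.pairwise_cons.mpr ⟨?_, ih.2.1⟩, ?_⟩
    · intro x hx; have := hb1 x hx; omega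
    · intro x hx; have := hb2 x hx; omega
    · intro d hd r hr
      rcases List.mem_cons.mp hd with rfl | hd <;> rcases List.mem_cons.mp hr with rfl | hr
      · omega
      · have := hb2 r hr; omega
      · have := hb1 d hd; omega
      · exact ih.2.2 d hd r hr

lemma pvInter_zip {lb : Int} {D R : List Int} (hI : pvInter lb D R) :
    ∀ p ∈ D.zip R, lb ≤ p.1 ∧ p.1 < p.2 ∧
      (D.contains (p.2 - 1) = decide (p.2 - 1 = p.1)) ∧
      (R.contains (p.1 + 1) = decide (p.1 + 1 = p.2)) := by
  induction hI with
  | nil => simp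
  | @cons lb d r D R h1 h2 h3 ih =>
    intro p hp
    obtain ⟨hbD, hbR⟩ := pvInter_bounds h3
    rcases List.mem_cons.mp (by simpa [List.zip_cons_cons] using hp) with rfl | hp
    · refine ⟨h1, h2, ?_, ?_⟩
      · rw [Bool.eq_iff_iff, List.contains_iff_mem, decide_eq_true_eq]
        simp only [List.mem_cons]
        constructor
        · rintro (h | h)
          · exact h
          · have := hbD _ h; omega
        · intro h; exact Or.inl h
      · rw [Bool.eq_iff_iff, List.contains_iff_mem, decide_eq_true_eq]
        simp only [List.mem_cons]
        constructor
        · rintro (h | h)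
          · exact h
          · have := hbR _ h; omega
        · intro h; exact Or.inl h
    · obtain ⟨hl, hlt, hcD, hcR⟩ := ih p hp
      have hp1 : p.1 ∈ D := (List.of_mem_zip hp).1
      have hp2 : p.2 ∈ R := (List.of_mem_zip hp).2
      have hd1 := hbD _ hp1
      have hr2 := hbR _ hp2
      refine ⟨by omega, hlt, ?_, ?_⟩
      · rw [Bool.eq_iff_iff, List.contains_iff_mem, decide_eq_true_eq] at hcD ⊢
        simp only [List.mem_cons]
        rw [← hcD]
        constructor
        · rintro (h | h)
          · omega
          · exact h
        · intro h; exact Or.inr h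
      · rw [Bool.eq_iff_iff, List.contains_iff_mem, decide_eq_true_eq] at hcR ⊢
        simp only [List.mem_cons]
        rw [← hcR]
        constructor
        · rintro (h | h)
          · omega
          · exact h
        · intro h; exact Or.inr h

-- one step of the scan only appends to the accumulators
lemma pvScanStep_acc (flock : List Int) (D R : List Int) (b : Bool) (i : Int) :
    pvScanStep flock (D, R, b) i =
      (D ++ (pvScanStep flock ([], [], b) i).1,
       R ++ (pvScanStep flock ([], [], b) i).2.1,
       (pvScanStep flock ([], [], b) i).2.2) := by
  simp only [pvScanStep]
  split_ifs <;> simp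

-- accumulator independence of the scan
lemma pvScan_acc (flock : List Int) (l : List Int) (D R : List Int) (b : Bool) :
    l.foldl (pvScanStep flock) (D, R, b) =
      (D ++ (l.foldl (pvScanStep flock) ([], [], b)).1,
       R ++ (l.foldl (pvScanStep flock) ([], [], b)).2.1,
       (l.foldl (pvScanStep flock) ([], [], b)).2.2) := by
  induction l generalizing D R b with
  | nil => simp
  | cons a l ih =>
    simp only [List.foldl_cons]
    rw [pvScanStep_acc flock D R b a,
        ih (D ++ (pvScanStep flock ([], [], b) a).1) (R ++ (pvScanStep flock ([], [], b) a).2.1)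
          (pvScanStep flock ([], [], b) a).2.2]
    rw [show pvScanStep flock ([], [], b) a =
          ((pvScanStep flock ([], [], b) a).1, (pvScanStep flock ([], [], b) a).2.1,
           (pvScanStep flock ([], [], b) a).2.2) from rfl,
        ih (pvScanStep flock ([], [], b) a).1 (pvScanStep flock ([], [], b) a).2.1
          (pvScanStep flock ([], [], b) a).2.2]
    simp

lemma pvRun_nil (flock : List Int) (i : Int) (b : Bool) (h : (flock.length : Int) ≤ i) :
    pvRun flock i b = ([], [], b) := by
  simp [pvRun, PySem.List.len_eq, PySem.List.pyRange_one_eq_nil h]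

lemma pvRun_cons (flock : List Int) (i : Int) (b : Bool) (h : i < (flock.length : Int)) :
    pvRun flock i b =
      ((pvScanStep flock ([], [], b) i).1 ++
         (pvRun flock (i + 1) (pvScanStep flock ([], [], b) i).2.2).1,
       (pvScanStep flock ([], [], b) i).2.1 ++
         (pvRun flock (i + 1) (pvScanStep flock ([], [], b) i).2.2).2.1,
       (pvRun flock (i + 1) (pvScanStep flock ([], [], b) i).2.2).2.2) := by
  unfold pvRun
  rw [PySem.List.len_eq, PySem.List.pyRange_one_cons h]
  simp only [List.foldl_cons]
  rw [show pvScanStep flock ([], [], b) i =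
        ((pvScanStep flock ([], [], b) i).1, (pvScanStep flock ([], [], b) i).2.1,
         (pvScanStep flock ([], [], b) i).2.2) from rfl,
      pvScan_acc]

-- structure of the scan's output
lemma pvRun_struct (flock : List Int) : ∀ (k : Nat) (i : Int), 0 ≤ i →
    (((flock.length : Int) - i).toNat = k) →
    ((pvInter i (pvRun flock i true).1 (pvRun flock i true).2.1 ∧
      (∀ d ∈ (pvRun flock i true).1, d + 1 < (flock.length : Int)) ∧
      (∀ r ∈ (pvRun flock i true).2.1, r < (flock.length : Int))) ∧
     (i < (flock.length : Int) →
       ∃ r0 R', (pvRun flock i false).2.1 = r0 :: R' ∧ i ≤ r0 ∧ r0 < (flock.length : Int) ∧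
         pvInter (r0 + 1) (pvRun flock i false).1 R' ∧
         (∀ d ∈ (pvRun flock i false).1, d + 1 < (flock.length : Int)) ∧
         (∀ r ∈ R', r < (flock.length : Int)))) := by
  intro k
  induction k with
  | zero =>
    intro i h0 hk
    have hni : (flock.length : Int) ≤ i := by omega
    rw [pvRun_nil flock i true hni, pvRun_nil flock i false hni]
    exact ⟨⟨pvInter.nil i, by simp, by simp⟩, fun hlt => absurd hlt (by omega)⟩
  | succ k ih =>
    intro i h0 hk
    by_cases hni : (flock.length : Int) ≤ i
    · rw [pvRun_nil flock i true hni, pvRun_nil flock i false hni]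
      exact ⟨⟨pvInter.nil i, by simp, by simp⟩, fun hlt => absurd hlt (by omega)⟩
    · have hlt : i < (flock.length : Int) := by omega
      have hk' : ((flock.length : Int) - (i + 1)).toNat = k := by omega
      have ih' := ih (i + 1) (by omega) hk'
      constructor
      · -- state want_donor = true
        rw [pvRun_cons flock i true hlt]
        by_cases hc : i + 1 < (flock.length : Int) ∧
            PySem.List.pyGetD flock i 0 > PySem.List.pyGetD flock (i + 1) 0
        · -- donor found at i
          have hstep : pvScanStep flock ([], [], true) i = ([i], [], false) := by
            simp [pvScanStep, PySem.List.len_eq, hc.1, hc.2]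
          rw [hstep]
          have h1n : i + 1 < (flock.length : Int) := hc.1
          obtain ⟨r0, R', hR, hir, hrn, hI, hbD, hbR⟩ := ih'.2 h1n
          rw [hR]
          refine ⟨?_, ?_, ?_⟩
          · exact pvInter.cons (le_refl i) (by omega) hI
          · intro d hd
            rcases List.mem_cons.mp hd with rfl | hd
            · exact h1n
            · exact hbD d hd
          · intro r hr
            rcases List.mem_cons.mp hr with rfl | hr
            · exact hrn
            · exact hbR r hr
        · -- no donor at i
          have hstep : pvScanStep flock ([], [], true) i = ([], [], true) := by
            simp only [pvScanStep, PySem.List.len_eq, if_true]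
            rw [if_neg hc]
          rw [hstep]
          simp only [List.nil_append]
          exact ⟨pvInter_mono (by omega) ih'.1.1, ih'.1.2.1, ih'.1.2.2⟩
      · -- state want_donor = false
        intro _
        rw [pvRun_cons flock i false hlt]
        by_cases hc : (flock.length : Int) ≤ i + 1 ∨
            PySem.List.pyGetD flock i 0 < PySem.List.pyGetD flock (i + 1) 0
        · -- recipient found at i
          have hstep : pvScanStep flock ([], [], false) i = ([], [i], true) := by
            simp only [pvScanStep, PySem.List.len_eq, Bool.false_eq_true, if_false]
            rw [if_pos hc]
            simp
          rw [hstep]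
          simp only [List.nil_append, List.cons_append]
          exact ⟨i, (pvRun flock (i + 1) true).2.1, by simp, le_refl i, hlt,
            ih'.1.1, ih'.1.2.1, ih'.1.2.2⟩
        · -- not a recipient at i
          have hstep : pvScanStep flock ([], [], false) i = ([], [], false) := by
            simp only [pvScanStep, PySem.List.len_eq, Bool.false_eq_true, if_false]
            rw [if_neg hc]
          rw [hstep]
          simp only [List.nil_append]
          have h1n : i + 1 < (flock.length : Int) := by omega
          obtain ⟨r0, R', hR, hir, hrn, hI, hbD, hbR⟩ := ih'.2 h1n
          exact ⟨r0, R', hR, by omega, hrn, hI, hbD, hbR⟩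

-- A's state machine and the boolean-mode scan keep identical accumulators
lemma pvFdrScan (flock : List Int) : ∀ (k : Nat) (i : Int), 0 ≤ i →
    (((flock.length : Int) - i).toNat = k) →
    ∀ (s : String) (b : Bool) (D R : List Int), (s = "donor" ∨ s = "recipient") →
    (s = "donor" ↔ b = true) →
    ((((PySem.List.pyRange i (PySem.List.len flock) 1).map
          (fun j => (j, PySem.List.pyGetD flock j 0))).foldl (pvFdrStep flock) (D, R, s)).1 =
       ((PySem.List.pyRange i (PySem.List.len flock) 1).foldl (pvScanStep flock) (D, R, b)).1 ∧
     (((PySem.List.pyRange i (PySem.List.len flock) 1).map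
          (fun j => (j, PySem.List.pyGetD flock j 0))).foldl (pvFdrStep flock) (D, R, s)).2.1 =
       ((PySem.List.pyRange i (PySem.List.len flock) 1).foldl (pvScanStep flock) (D, R, b)).2.1) := by
  intro k
  induction k with
  | zero =>
    intro i h0 hk s b D R hs hsb
    have hni : (flock.length : Int) ≤ i := by omega
    rw [PySem.List.len_eq, PySem.List.pyRange_one_eq_nil hni]
    exact ⟨rfl, rfl⟩
  | succ k ih =>
    intro i h0 hk s b D R hs hsb
    by_cases hni : (flock.length : Int) ≤ i
    · rw [PySem.List.len_eq, PySem.List.pyRange_one_eq_nil hni]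
      exact ⟨rfl, rfl⟩
    · have hlt : i < (flock.length : Int) := by omega
      have hk' : ((flock.length : Int) - (i + 1)).toNat = k := by omega
      rw [PySem.List.len_eq, PySem.List.pyRange_one_cons hlt]
      simp only [List.map_cons, List.foldl_cons, ← PySem.List.len_eq]
      by_cases h1 : i + 1 < (flock.length : Int)
      · -- flock[i+1] exists
        have hg : PySem.List.pyGet? flock (i + 1) = some (PySem.List.pyGetD flock (i + 1) 0) := by
          rw [PySem.List.pyGet?_eq_some_getElem flock (by omega) h1,
              PySem.List.pyGetD_eq_getElem _ _ (by omega) h1]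
        rcases hs with rfl | rfl
        · -- looking for a donor
          have hb : b = true := hsb.mp rfl
          subst hb
          by_cases hgt : PySem.List.pyGetD flock i 0 > PySem.List.pyGetD flock (i + 1) 0
          · have hA : pvFdrStep flock (D, R, "donor") (i, PySem.List.pyGetD flock i 0) =
                (D ++ [i], R, "recipient") := by
              simp [pvFdrStep, hg, hgt]
            have hB : pvScanStep flock (D, R, true) i = (D ++ [i], R, false) := by
              simp [pvScanStep, PySem.List.len_eq, h1, hgt]
            rw [hA, hB]
            exact ih (i + 1) (by omega) hk' "recipient" false (D ++ [i]) R (Or.inr rfl)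
              (by simp)
          · have hA : pvFdrStep flock (D, R, "donor") (i, PySem.List.pyGetD flock i 0) =
                (D, R, "donor") := by
              simp [pvFdrStep, hg, hgt]
            have hB : pvScanStep flock (D, R, true) i = (D, R, true) := by
              simp only [pvScanStep, if_true]
              rw [if_neg (fun hcond => hgt hcond.2)]
            rw [hA, hB]
            exact ih (i + 1) (by omega) hk' "donor" true D R (Or.inl rfl) (by simp)
        · -- looking for a recipient
          have hb : b = false := by
            cases b
            · rfl
            · exact absurd (hsb.mpr rfl) (by simp)
          subst hb
          by_cases hgt : PySem.List.pyGetD flock i 0 < PySem.List.pyGetD flock (i + 1) 0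
          · have hA : pvFdrStep flock (D, R, "recipient") (i, PySem.List.pyGetD flock i 0) =
                (D, R ++ [i], "donor") := by
              simp [pvFdrStep, hg, hgt]
            have hB : pvScanStep flock (D, R, false) i = (D, R ++ [i], true) := by
              simp only [pvScanStep, Bool.false_eq_true, if_false]
              rw [if_pos (Or.inr hgt)]
            rw [hA, hB]
            exact ih (i + 1) (by omega) hk' "donor" true D (R ++ [i]) (Or.inl rfl) (by simp)
          · have hA : pvFdrStep flock (D, R, "recipient") (i, PySem.List.pyGetD flock i 0) =
                (D, R, "recipient") := by
              simp [pvFdrStep, hg, hgt]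
            have hB : pvScanStep flock (D, R, false) i = (D, R, false) := by
              simp only [pvScanStep, PySem.List.len_eq, Bool.false_eq_true, if_false]
              rw [if_neg (fun hcond => hcond.elim (fun hx => absurd hx (not_le.mpr h1)) (fun hx => hgt hx))]
            rw [hA, hB]
            exact ih (i + 1) (by omega) hk' "recipient" false D R (Or.inr rfl) (by simp)
      · -- i is the last index: flock[i+1] raises IndexError
        have hg : PySem.List.pyGet? flock (i + 1) = none := by
          rw [PySem.List.pyGet?_eq_none_iff]
          simp only [PySem.Raise.InRange]
          omega
        have hnil : PySem.List.pyRange (i + 1) (PySem.List.len flock) 1 = [] := by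
          rw [PySem.List.len_eq]
          exact PySem.List.pyRange_one_eq_nil (by omega)
        rw [hnil]
        simp only [List.map_nil, List.foldl_nil]
        rcases hs with rfl | rfl
        · have hb : b = true := hsb.mp rfl
          subst hb
          have hA : pvFdrStep flock (D, R, "donor") (i, PySem.List.pyGetD flock i 0) =
              (D, R, "donor") := by
            simp [pvFdrStep, hg]
          have hB : pvScanStep flock (D, R, true) i = (D, R, true) := by
            simp only [pvScanStep, PySem.List.len_eq, if_true]
            rw [if_neg (fun hcond => h1 hcond.1)]
          rw [hA, hB]
          exact ⟨rfl, rfl⟩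
        · have hb : b = false := by
            cases b
            · rfl
            · exact absurd (hsb.mpr rfl) (by simp)
          subst hb
          have hA : pvFdrStep flock (D, R, "recipient") (i, PySem.List.pyGetD flock i 0) =
              (D, R ++ [i], "recipient") := by
            simp [pvFdrStep, hg]
          have hB : pvScanStep flock (D, R, false) i = (D, R ++ [i], true) := by
            simp only [pvScanStep, PySem.List.len_eq, Bool.false_eq_true, if_false]
            rw [if_pos (Or.inl (by omega))]
          rw [hA, hB]
          exact ⟨rfl, rfl⟩

-- A's state machine computes the same donor/recipient lists as the scan
lemma pvFdr_eq_scan (flock : List Int) :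
    (find_donors_and_recipients flock).1 = (pvRun flock 0 true).1 ∧
    (find_donors_and_recipients flock).2 = (pvRun flock 0 true).2.1 := by
  have h := pvFdrScan flock ((flock.length : Int) - 0).toNat 0 (by omega) rfl "donor" true [] []
    (Or.inl rfl) (by simp)
  unfold find_donors_and_recipients pvRun
  rw [PySem.List.enumerate_eq_map_pyRange flock 0]
  exact h

-- the entries A's two gap loops produce per (donor, recipient) pair of the zip
def pvRecGap (flock : List Int) (p : Int × Int) : Int :=
  if p.2 - 1 = p.1 then
    -(PySem.Int.floordiv (PySem.List.pyGetD flock p.2 0 - PySem.List.pyGetD flock (p.2 - 1) 0) 2)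
  else PySem.List.pyGetD flock (p.2 - 1) 0 - PySem.List.pyGetD flock p.2 0 + 1

def pvDonGaps (flock : List Int) (p : Int × Int) : List Int :=
  (if 0 ≤ p.1 - 1 ∧ PySem.List.pyGetD flock (p.1 - 1) 0 = PySem.List.pyGetD flock p.1 0
    then [(1 : Int)] else []) ++
  [if p.1 + 1 = p.2 then
      -(PySem.Int.floordiv (PySem.List.pyGetD flock (p.1 + 1) 0 - PySem.List.pyGetD flock p.1 0) 2)
    else PySem.List.pyGetD flock p.1 0 - PySem.List.pyGetD flock (p.1 + 1) 0]

-- min(gaps) in A's port / min(gaps, default=0) in B's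
def pvMinL (l : List Int) : Int := match l with | [] => 0 | h :: t => t.foldl min h

-- A's number of rounds to skip over the zip of donors and recipients
lemma pvGaps_eq (flock : List Int) :
    num_rounds_to_skip flock =
      pvMinL ((((pvRun flock 0 true).1.zip (pvRun flock 0 true).2.1).map (pvRecGap flock)) ++
        (((pvRun flock 0 true).1.zip (pvRun flock 0 true).2.1).flatMap (pvDonGaps flock))) := by
  obtain ⟨hD, hR⟩ := pvFdr_eq_scan flock
  obtain ⟨⟨hI, hbD, hbR⟩, -⟩ :=
    pvRun_struct flock ((flock.length : Int) - 0).toNat 0 (by omega) rfl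
  have hlen := pvInter_length hI
  have hzip := pvInter_zip hI
  set D := (pvRun flock 0 true).1 with hDdef
  set R := (pvRun flock 0 true).2.1 with hRdef
  simp only [num_rounds_to_skip, pvMinL]
  rw [hD, hR]
  rw [PySem.List.foldl_congr_mem' R _
        (fun acc r =>
          acc ++ [if D.contains (r - 1) then
              pvCeilHalfA (PySem.List.pyGetD flock (r - 1) 0 - PySem.List.pyGetD flock r 0)
            else PySem.List.pyGetD flock (r - 1) 0 - PySem.List.pyGetD flock r 0 + 1]) []
        (by intro r _ acc; by_cases h : r - 1 ∈ D <;> simp [h]),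
      PySem.List.foldl_append_singleton_eq_map]
  rw [PySem.List.foldl_congr_mem' D _
        (fun acc d =>
          acc ++ ((if 0 ≤ d - 1 ∧
                PySem.List.pyGetD flock (d - 1) 0 = PySem.List.pyGetD flock d 0
              then [(1 : Int)] else []) ++
            [if R.contains (d + 1) then
                pvCeilHalfA (PySem.List.pyGetD flock d 0 - PySem.List.pyGetD flock (d + 1) 0)
              else PySem.List.pyGetD flock d 0 - PySem.List.pyGetD flock (d + 1) 0])) _
        (by intro d _ acc
            by_cases h1 : 0 ≤ d - 1 ∧
              PySem.List.pyGetD flock (d - 1) 0 = PySem.List.pyGetD flock d 0 <;>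
              by_cases h2 : d + 1 ∈ R <;> simp [h1, h2] <;> split_ifs <;> simp),
      PySem.List.foldl_append_eq_flatMap]
  have hRmap : R.map (fun r => if D.contains (r - 1) then
        pvCeilHalfA (PySem.List.pyGetD flock (r - 1) 0 - PySem.List.pyGetD flock r 0)
      else PySem.List.pyGetD flock (r - 1) 0 - PySem.List.pyGetD flock r 0 + 1) =
      (D.zip R).map (pvRecGap flock) := by
    conv_lhs => rw [← List.map_snd_zip (le_of_eq hlen.symm), List.map_map]
    refine List.map_congr_left ?_
    intro p hp
    obtain ⟨-, -, hcD, -⟩ := hzip p hp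
    simp only [Function.comp_apply, pvRecGap, hcD]
    by_cases hc : p.2 - 1 = p.1
    · simp [hc, pvCeilHalfA, neg_sub]
    · simp [hc]
  have hDmap : D.flatMap (fun d => (if 0 ≤ d - 1 ∧
          PySem.List.pyGetD flock (d - 1) 0 = PySem.List.pyGetD flock d 0
        then [(1 : Int)] else []) ++
      [if R.contains (d + 1) then
          pvCeilHalfA (PySem.List.pyGetD flock d 0 - PySem.List.pyGetD flock (d + 1) 0)
        else PySem.List.pyGetD flock d 0 - PySem.List.pyGetD flock (d + 1) 0]) =
      (D.zip R).flatMap (pvDonGaps flock) := by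
    conv_lhs => rw [← List.map_fst_zip (le_of_eq hlen), List.flatMap_map]
    refine List.flatMap_congr ?_
    intro p hp
    obtain ⟨-, -, -, hcR⟩ := hzip p hp
    simp only [pvDonGaps, hcR]
    by_cases hc : p.1 + 1 = p.2
    · simp [hc, pvCeilHalfA, neg_sub]
    · simp [hc]
  rw [hRmap, hDmap, List.nil_append]

-- ---------- B side ----------

-- B's run-length encoder, as a forward recursion on the start index with the last nonzero sign
def pvEvRun (flock : List Int) : Nat → Int → Int → List (Int × Int)
  | 0, _, _ => []
  | Nat.succ k, i, last =>
    if pvSig flock i ≠ 0 ∧ pvSig flock i ≠ last then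
      (pvSig flock i, i) :: pvEvRun flock k (i + 1) (pvSig flock i)
    else pvEvRun flock k (i + 1) last

-- B's events fold computes pvEvRun
lemma pvEvFold (flock : List Int) : ∀ (k : Nat) (i : Int),
    (((flock.length : Int) - 1 - i).toNat = k) →
    ∀ (evs : List (Int × Int)) (last : Int),
      ((evs.getLast?).getD ((0 : Int), (0 : Int))).1 = last → (evs = [] → last = 0) →
      (PySem.List.pyRange i ((flock.length : Int) - 1) 1).foldl (pvEvStep flock) evs =
        evs ++ pvEvRun flock k i last := by
  intro k
  induction k with
  | zero =>
    intro i hk evs last _ _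
    have hni : (flock.length : Int) - 1 ≤ i := by omega
    rw [PySem.List.pyRange_one_eq_nil hni]
    simp [pvEvRun]
  | succ k ih =>
    intro i hk evs last hlast hemp
    have hlt : i < (flock.length : Int) - 1 := by omega
    rw [PySem.List.pyRange_one_cons hlt]
    simp only [List.foldl_cons]
    by_cases hc : pvSig flock i ≠ 0 ∧ pvSig flock i ≠ last
    · have hstep : pvEvStep flock evs i = evs ++ [(pvSig flock i, i)] := by
        simp only [pvEvStep]
        rw [if_pos]
        refine ⟨hc.1, ?_⟩
        by_cases he : evs = []
        · exact Or.inl he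
        · refine Or.inr ?_
          rw [hlast]
          exact fun h => hc.2 h.symm
      rw [hstep, ih (i + 1) (by omega) (evs ++ [(pvSig flock i, i)]) (pvSig flock i)
            (by simp) (by simp)]
      simp only [pvEvRun]
      rw [if_pos hc]
      simp
    · have hstep : pvEvStep flock evs i = evs := by
        simp only [pvEvStep]
        rw [if_neg]
        intro ⟨h0, hor⟩
        apply hc
        refine ⟨h0, ?_⟩
        rcases hor with he | hne
        · rw [hemp he]; exact h0
        · rw [← hlast]; exact fun h => hne h.symm
      rw [hstep, ih (i + 1) (by omega) evs last hlast hemp]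
      simp only [pvEvRun]
      rw [if_neg hc]

-- the donor/recipient pairs read off an event list (next run's start, or the last column)
def pvPairsAux (endIdx : Int) : List (Int × Int) → List (Int × Int)
  | [] => []
  | e :: E =>
    (if e.1 < 0 then [(e.2, match E with | [] => endIdx | e' :: _ => e'.2)] else []) ++
      pvPairsAux endIdx E

-- B's shifted-zip comprehension computes pvPairsAux
lemma pvPairsZip (endIdx : Int) : ∀ (E : List (Int × Int)) (acc : List (Int × Int)),
    (E.zip (E.tail ++ [((1 : Int), endIdx)])).foldl
      (fun acc q => if q.1.1 < 0 then acc ++ [(q.1.2, q.2.2)] else acc) acc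
    = acc ++ pvPairsAux endIdx E := by
  intro E
  induction E with
  | nil => intro acc; simp [pvPairsAux]
  | cons x E ih =>
    intro acc
    cases E with
    | nil =>
      simp only [List.tail_cons, List.nil_append, List.zip_cons_cons, List.zip_nil_left,
        List.foldl_cons, List.foldl_nil, pvPairsAux]
      split_ifs <;> simp
    | cons e E' =>
      simp only [List.tail_cons] at ih ⊢
      simp only [List.cons_append, List.zip_cons_cons, List.foldl_cons]
      rw [ih]
      simp only [pvPairsAux]
      split_ifs <;> simp

-- the scan's zip of donors and recipients equals the pairs read off the event runs
lemma pvMain (flock : List Int) : ∀ (k : Nat) (i : Int), 0 ≤ i →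
    (((flock.length : Int) - i).toNat = k) →
    ((∀ last : Int, last ≠ -1 →
        (pvRun flock i true).1.zip (pvRun flock i true).2.1 =
          pvPairsAux ((flock.length : Int) - 1)
            (pvEvRun flock (((flock.length : Int) - 1 - i).toNat) i last))
     ∧ (i < (flock.length : Int) →
        ∃ R', (pvRun flock i false).2.1 =
            (match pvEvRun flock (((flock.length : Int) - 1 - i).toNat) i (-1) with
             | [] => (flock.length : Int) - 1
             | e :: _ => e.2) :: R'
          ∧ (pvRun flock i false).1.zip R' =
            pvPairsAux ((flock.length : Int) - 1)
              (pvEvRun flock (((flock.length : Int) - 1 - i).toNat) i (-1)))) := by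
  intro k
  induction k with
  | zero =>
    intro i h0 hk
    have hni : (flock.length : Int) ≤ i := by omega
    have hf : ((flock.length : Int) - 1 - i).toNat = 0 := by omega
    rw [hf]
    constructor
    · intro last _
      rw [pvRun_nil flock i true hni]
      rfl
    · intro hlt; omega
  | succ k ih =>
    intro i h0 hk
    by_cases hni : (flock.length : Int) ≤ i
    · have hf : ((flock.length : Int) - 1 - i).toNat = 0 := by omega
      rw [hf]
      constructor
      · intro last _
        rw [pvRun_nil flock i true hni]
        rfl
      · intro hlt; omega
    · have hlt : i < (flock.length : Int) := by omega
      by_cases hend : i = (flock.length : Int) - 1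
      · -- the very last index: no event, A's machine may still close a recipient here
        have hf : ((flock.length : Int) - 1 - i).toNat = 0 := by omega
        rw [hf]
        constructor
        · intro last _
          rw [pvRun_cons flock i true hlt]
          have hstep : pvScanStep flock ([], [], true) i = ([], [], true) := by
            simp only [pvScanStep, PySem.List.len_eq, if_true]
            rw [if_neg (fun hcond => by omega)]
          rw [hstep]
          simp only [List.nil_append]
          rw [pvRun_nil flock (i + 1) true (by omega)]
          rfl
        · intro _
          rw [pvRun_cons flock i false hlt]
          have hstep : pvScanStep flock ([], [], false) i = ([], [i], true) := by
            simp only [pvScanStep, PySem.List.len_eq, Bool.false_eq_true, if_false]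
            rw [if_pos (Or.inl (by omega))]
            simp
          rw [hstep, pvRun_nil flock (i + 1) true (by omega)]
          refine ⟨[], ?_, ?_⟩
          · simp [pvEvRun, hend]
          · simp [pvEvRun, pvPairsAux]
      · -- interior index
        have hlt1 : i < (flock.length : Int) - 1 := by omega
        have hf : ((flock.length : Int) - 1 - i).toNat =
            ((flock.length : Int) - 1 - (i + 1)).toNat + 1 := by omega
        have hk' : ((flock.length : Int) - (i + 1)).toNat = k := by omega
        have ih' := ih (i + 1) (by omega) hk'
        rw [hf]
        rcases lt_trichotomy (PySem.List.pyGetD flock i 0) (PySem.List.pyGetD flock (i + 1) 0)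
          with hcmp | hcmp | hcmp
        · -- ascent: s = 1
          have hs : pvSig flock i = 1 := by
            simp [pvSig, hcmp, not_lt.mpr (le_of_lt hcmp)]
          constructor
          · intro last hlast
            rw [pvRun_cons flock i true hlt]
            have hstep : pvScanStep flock ([], [], true) i = ([], [], true) := by
              simp only [pvScanStep, PySem.List.len_eq, if_true]
              rw [if_neg (fun hcond => absurd hcond.2 (not_lt.mpr (le_of_lt hcmp)))]
            rw [hstep]
            simp only [List.nil_append]
            by_cases hl1 : last = 1
            · subst hl1
              simp only [pvEvRun, hs]
              rw [if_neg (by simp)]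
              exact ih'.1 1 (by decide)
            · simp only [pvEvRun, hs]
              rw [if_pos ⟨by decide, fun h => hl1 h.symm⟩]
              simp only [pvPairsAux]
              rw [if_neg (by decide)]
              simp only [List.nil_append]
              exact ih'.1 1 (by decide)
          · intro _
            rw [pvRun_cons flock i false hlt]
            have hstep : pvScanStep flock ([], [], false) i = ([], [i], true) := by
              simp only [pvScanStep, PySem.List.len_eq, Bool.false_eq_true, if_false]
              rw [if_pos (Or.inr hcmp)]
              simp
            rw [hstep]
            simp only [List.nil_append, List.cons_append]
            simp only [pvEvRun, hs]
            rw [if_pos ⟨by decide, by decide⟩]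
            refine ⟨(pvRun flock (i + 1) true).2.1, rfl, ?_⟩
            simp only [pvPairsAux]
            rw [if_neg (by decide)]
            simp only [List.nil_append]
            exact ih'.1 1 (by decide)
        · -- equal neighbours: s = 0
          have hs : pvSig flock i = 0 := by
            simp [pvSig, hcmp]
          constructor
          · intro last hlast
            rw [pvRun_cons flock i true hlt]
            have hstep : pvScanStep flock ([], [], true) i = ([], [], true) := by
              simp only [pvScanStep, PySem.List.len_eq, if_true]
              rw [if_neg (fun hcond => absurd hcond.2 (by omega))]
            rw [hstep]
            simp only [List.nil_append]
            simp only [pvEvRun, hs]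
            rw [if_neg (by simp)]
            exact ih'.1 last hlast
          · intro _
            rw [pvRun_cons flock i false hlt]
            have hstep : pvScanStep flock ([], [], false) i = ([], [], false) := by
              simp only [pvScanStep, PySem.List.len_eq, Bool.false_eq_true, if_false]
              rw [if_neg (fun hcond => by omega)]
            rw [hstep]
            simp only [List.nil_append]
            simp only [pvEvRun, hs]
            rw [if_neg (by simp)]
            exact ih'.2 (by omega)
        · -- descent: s = -1
          have hs : pvSig flock i = -1 := by
            simp [pvSig, hcmp, not_lt.mpr (le_of_lt hcmp)]
          constructor
          · intro last hlast
            rw [pvRun_cons flock i true hlt]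
            have hstep : pvScanStep flock ([], [], true) i = ([i], [], false) := by
              simp [pvScanStep, PySem.List.len_eq, hcmp, show i + 1 < (flock.length : Int) by omega]
            rw [hstep]
            simp only [List.nil_append, List.cons_append]
            simp only [pvEvRun, hs]
            rw [if_pos ⟨by decide, fun h => hlast h.symm⟩]
            obtain ⟨R', hR, hz⟩ := ih'.2 (by omega)
            rw [hR]
            simp only [pvPairsAux]
            rw [if_pos (by decide)]
            simp only [List.zip_cons_cons, List.singleton_append]
            rw [hz]
          · intro _
            rw [pvRun_cons flock i false hlt]
            have hstep : pvScanStep flock ([], [], false) i = ([], [], false) := by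
              simp only [pvScanStep, PySem.List.len_eq, Bool.false_eq_true, if_false]
              rw [if_neg (fun hcond => by omega)]
            rw [hstep]
            simp only [List.nil_append]
            simp only [pvEvRun, hs]
            rw [if_neg (by simp)]
            exact ih'.2 (by omega)

-- per-pair: B's gap block is exactly A's recipient gap followed by A's donor gaps
lemma pvBlock_eq (flock : List Int) (p : Int × Int) :
    pvGapStep flock [] p = pvRecGap flock p :: pvDonGaps flock p := by
  simp only [pvGapStep, pvRecGap, pvDonGaps]
  by_cases hadj : p.2 = p.1 + 1
  · have h1 : p.2 - 1 = p.1 := by omega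
    have h2 : p.1 + 1 = p.2 := by omega
    rw [if_pos hadj, if_pos h1, if_pos h2, h1, h2]
    by_cases hone : 0 ≤ p.1 - 1 ∧ PySem.List.pyGetD flock (p.1 - 1) 0 = PySem.List.pyGetD flock p.1 0
    · rw [if_pos hone, if_pos (show p.1 > 0 ∧ PySem.List.pyGetD flock (p.1 - 1) 0 =
          PySem.List.pyGetD flock p.1 0 from ⟨by omega, hone.2⟩)]
      simp
    · rw [if_neg hone, if_neg (show ¬(p.1 > 0 ∧ PySem.List.pyGetD flock (p.1 - 1) 0 =
          PySem.List.pyGetD flock p.1 0) from fun h => hone ⟨by omega, h.2⟩)]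
      simp
  · have h1 : ¬(p.2 - 1 = p.1) := by omega
    have h2 : ¬(p.1 + 1 = p.2) := by omega
    rw [if_neg hadj, if_neg h1, if_neg h2]
    by_cases hone : 0 ≤ p.1 - 1 ∧ PySem.List.pyGetD flock (p.1 - 1) 0 = PySem.List.pyGetD flock p.1 0
    · rw [if_pos hone, if_pos (show p.1 > 0 ∧ PySem.List.pyGetD flock (p.1 - 1) 0 =
          PySem.List.pyGetD flock p.1 0 from ⟨by omega, hone.2⟩)]
      simp
    · rw [if_neg hone, if_neg (show ¬(p.1 > 0 ∧ PySem.List.pyGetD flock (p.1 - 1) 0 =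
          PySem.List.pyGetD flock p.1 0) from fun h => hone ⟨by omega, h.2⟩)]
      simp

lemma pvGapStep_acc (flock : List Int) (acc : List Int) (p : Int × Int) :
    pvGapStep flock acc p = acc ++ pvGapStep flock [] p := by
  simp only [pvGapStep]
  split_ifs <;> simp

-- the left fold of min computes the minimum of the list
lemma pvFoldlMin_min : ∀ (t : List Int) (h : Int),
    (t.foldl min h = h ∨ t.foldl min h ∈ t) ∧ t.foldl min h ≤ h ∧ ∀ y ∈ t, t.foldl min h ≤ y := by
  intro t
  induction t with
  | nil => intro h; simp
  | cons a t ih =>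
    intro h
    simp only [List.foldl_cons]
    obtain ⟨hm, hle, hall⟩ := ih (min h a)
    refine ⟨?_, ?_, ?_⟩
    · rcases hm with hm | hm
      · rcases le_total h a with hha | hha
        · left; rw [hm]; exact min_eq_left hha
        · right; rw [hm, min_eq_right hha]; exact List.mem_cons_self ..
      · right; exact List.mem_cons_of_mem _ hm
    · exact le_trans hle (min_le_left _ _)
    · intro y hy
      rcases List.mem_cons.mp hy with rfl | hy
      · exact le_trans hle (min_le_right _ _)
      · exact hall y hy

-- min(xs) depends only on the multiset of values
lemma pvMinL_perm {l1 l2 : List Int} (hp : l1.Perm l2) : pvMinL l1 = pvMinL l2 := by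
  cases l1 with
  | nil =>
    rw [← List.Perm.nil_eq hp]
  | cons h1 t1 =>
    cases l2 with
    | nil => exact absurd hp.symm (by simp)
    | cons h2 t2 =>
      simp only [pvMinL]
      obtain ⟨hm1, hle1, hall1⟩ := pvFoldlMin_min t1 h1
      obtain ⟨hm2, hle2, hall2⟩ := pvFoldlMin_min t2 h2
      have hmem1 : t1.foldl min h1 ∈ h1 :: t1 := by
        rcases hm1 with hm | hm
        · rw [hm]; exact List.mem_cons_self ..
        · exact List.mem_cons_of_mem _ hm
      have hmem2 : t2.foldl min h2 ∈ h2 :: t2 := by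
        rcases hm2 with hm | hm
        · rw [hm]; exact List.mem_cons_self ..
        · exact List.mem_cons_of_mem _ hm
      have h12 : t2.foldl min h2 ≤ t1.foldl min h1 := by
        rcases List.mem_cons.mp ((hp.mem_iff).mp hmem1) with he | he
        · omega
        · exact hall2 _ he
      have h21 : t1.foldl min h1 ≤ t2.foldl min h2 := by
        rcases List.mem_cons.mp ((hp.symm.mem_iff).mp hmem2) with he | he
        · omega
        · exact hall1 _ he
      omega

-- interleaving the two gap lists per pair is a permutation of A's two-block layout
lemma pvPermInterleave {α : Type} (f : α → Int) (g : α → List Int) :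
    ∀ (Z : List α), (Z.map f ++ Z.flatMap g).Perm (Z.flatMap (fun p => f p :: g p)) := by
  intro Z
  induction Z with
  | nil => simp
  | cons q Z ih =>
    simp only [List.map_cons, List.flatMap_cons, List.cons_append]
    exact List.Perm.cons (f q)
      ((List.perm_append_comm_assoc _ _ _).trans (List.Perm.append_left _ ih))

-- the offset dict built from the pairs, looked up at any key
lemma pvOffGetD (δ : Int) : ∀ (Z : List (Int × Int)),
    (Z.map Prod.fst ++ Z.map Prod.snd).Nodup →
    ∀ (d0 : PySem.Dict Int Int) (k : Int),
      (Z.foldl (fun d q => (d.insert q.1 (-δ)).insert q.2 δ) d0).getD k 0 =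
        if k ∈ Z.map Prod.fst then -δ else if k ∈ Z.map Prod.snd then δ else d0.getD k 0 := by
  intro Z
  induction Z with
  | nil => intro _ d0 k; simp
  | cons q Z ih =>
    intro hnd d0 k
    rw [List.map_cons, List.map_cons, List.cons_append, List.nodup_cons] at hnd
    obtain ⟨hq1, hnd1⟩ := hnd
    rw [List.nodup_append] at hnd1
    obtain ⟨hZf, hn2, hdj⟩ := hnd1
    have hq2s : q.2 ∉ Z.map Prod.snd := (List.nodup_cons.mp hn2).1
    have hZs : (Z.map Prod.snd).Nodup := (List.nodup_cons.mp hn2).2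
    have hq1f : q.1 ∉ Z.map Prod.fst := fun h => hq1 (List.mem_append_left _ h)
    have hq12 : q.1 ≠ q.2 := fun h =>
      hq1 (List.mem_append_right _ (by rw [h]; exact List.mem_cons_self ..))
    have hq1s : q.1 ∉ Z.map Prod.snd := fun h =>
      hq1 (List.mem_append_right _ (List.mem_cons_of_mem _ h))
    have hq2f : q.2 ∉ Z.map Prod.fst := fun h => hdj q.2 h q.2 (List.mem_cons_self ..) rfl
    have hnd' : (Z.map Prod.fst ++ Z.map Prod.snd).Nodup :=
      List.nodup_append.mpr ⟨hZf, hZs, fun a ha b hb => hdj a ha b (List.mem_cons_of_mem _ hb)⟩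
    simp only [List.foldl_cons]
    rw [ih hnd' _ k, PySem.Dict.getD_insert, PySem.Dict.getD_insert]
    simp only [List.map_cons, List.mem_cons]
    by_cases hkf : k ∈ Z.map Prod.fst
    · have hk2 : ¬(k = q.2) := fun h => hq2f (h ▸ hkf)
      have hk1 : ¬(k = q.1) := fun h => hq1f (h ▸ hkf)
      simp [hkf, hk1]
    · by_cases hks : k ∈ Z.map Prod.snd
      · have hk2 : ¬(k = q.2) := fun h => hq2s (h ▸ hks)
        have hk1 : ¬(k = q.1) := fun h => hq1s (h ▸ hks)
        simp [hkf, hks, hk1, hk2]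
      · by_cases hk2 : k = q.2
        · subst hk2
          simp [hq2f, hq2s, show ¬(q.2 = q.1) from fun h => hq12 h.symm]
        · by_cases hk1 : k = q.1
          · subst hk1
            simp [hq1f, hq1s, hq12]
          · simp [hkf, hks, hk1, hk2]

-- elementwise description of A's read-modify-write fold
lemma pvFoldSet_getElem? (v : Int → Int) :
    ∀ (L : List Int) (fl : List Int), (∀ x ∈ L, 0 ≤ x ∧ x < (fl.length : Int)) → L.Nodup →
    ∀ (k : Nat),
      (L.foldl (fun fl x => PySem.List.pySetD fl x (v (PySem.List.pyGetD fl x 0))) fl)[k]? =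
        if ((k : Int) ∈ L) then fl[k]?.map v else fl[k]? := by
  intro L
  induction L with
  | nil => intro fl _ _ k; simp
  | cons x L ih =>
    intro fl hrange hnd k
    obtain ⟨hx0, hxlt⟩ := hrange x (List.mem_cons_self ..)
    have hset : PySem.List.pySetD fl x (v (PySem.List.pyGetD fl x 0)) =
        fl.set x.toNat (v fl[x.toNat]) := by
      rw [PySem.List.pySetD_of_nonneg _ _ hx0, PySem.List.pyGetD_eq_getElem _ _ hx0 hxlt]
    simp only [List.foldl_cons, hset]
    have hlen : (fl.set x.toNat (v fl[x.toNat])).length = fl.length := by simp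
    rw [ih _ (by intro y hy; have := hrange y (List.mem_cons_of_mem _ hy); omega)
          (List.nodup_cons.mp hnd).2 k]
    have hxL : x ∉ L := (List.nodup_cons.mp hnd).1
    by_cases hkL : (k : Int) ∈ L
    · have hne : x.toNat ≠ k := by
        intro h
        apply hxL
        have : x = (k : Int) := by omega
        rwa [this]
      simp [hkL, List.mem_cons, hne]
    · by_cases hkx : (k : Int) = x
      · have hk : x.toNat = k := by omega
        have hklt : k < fl.length := by omega
        simp [hkx, hk, hklt, hxL]
      · simp [hkL, hkx, List.mem_cons, show x.toNat ≠ k by omega]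

lemma pvFoldSet_length (v : Int → Int) (L : List Int) : ∀ (fl : List Int),
    (L.foldl (fun fl x => PySem.List.pySetD fl x (v (PySem.List.pyGetD fl x 0))) fl).length
      = fl.length := by
  induction L with
  | nil => intro fl; rfl
  | cons x L ih =>
    intro fl
    simp only [List.foldl_cons]
    rw [ih]
    exact PySem.List.length_pySetD _ _ _

-- ===== VERDICT (by name: the statement is the Claim_ definition above) =====
theorem advance_simulation_spec : Claim_equal_advance_simulation := by
  intro old flock _
  unfold Spec_advance_simulation
  obtain ⟨hfD, hfR⟩ := pvFdr_eq_scan flock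
  obtain ⟨⟨hI, hbD, hbR⟩, -⟩ :=
    pvRun_struct flock ((flock.length : Int) - 0).toNat 0 (by omega) rfl
  set D := (pvRun flock 0 true).1 with hDdef
  set R := (pvRun flock 0 true).2.1 with hRdef
  have hlen := pvInter_length hI
  obtain ⟨hbndD, hbndR⟩ := pvInter_bounds hI
  obtain ⟨hpwD, hpwR, hdisj⟩ := pvInter_pairwise hI
  have hndD : D.Nodup := hpwD.imp (fun h => ne_of_lt h)
  have hndR : R.Nodup := hpwR.imp (fun h => ne_of_lt h)
  -- B's events are the event-run recursion
  have hE : (PySem.List.pyRange 0 (PySem.List.len flock - 1) 1).foldl (pvEvStep flock) [] =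
      pvEvRun flock (((flock.length : Int) - 1 - 0).toNat) 0 0 := by
    rw [PySem.List.len_eq]
    exact pvEvFold flock (((flock.length : Int) - 1 - 0).toNat) 0 rfl [] 0 rfl (fun _ => rfl)
  -- B's pairs are exactly zip donors recipients
  have hPairs : ∀ (E : List (Int × Int)), E = pvEvRun flock (((flock.length : Int) - 1 - 0).toNat) 0 0 →
      (E.zip (PySem.List.slice E (some 1) none ++ [((1 : Int), PySem.List.len flock - 1)])).foldl
        (fun acc q => if q.1.1 < 0 then acc ++ [(q.1.2, q.2.2)] else acc)
        ([] : List (Int × Int)) = D.zip R := by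
    intro E hEdef
    rw [PySem.List.slice_from_one, PySem.List.len_eq, pvPairsZip, List.nil_append, hEdef]
    exact ((pvMain flock ((flock.length : Int) - 0).toNat 0 (by omega) rfl).1 0 (by decide)).symm
  -- reduce B to its let-free form
  show _ = advance_simulation_alt old flock
  unfold advance_simulation_alt
  simp only [hE, hPairs _ rfl]
  -- gaps and delta
  have hZsub := pvInter_zip hI
  have hgapsB : (D.zip R).foldl (pvGapStep flock) [] =
      (D.zip R).flatMap (fun p => pvRecGap flock p :: pvDonGaps flock p) := by
    rw [PySem.List.foldl_congr_mem' (D.zip R) _ (fun acc p => acc ++ pvGapStep flock [] p) []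
          (by intro p _ acc; exact pvGapStep_acc flock acc p),
        PySem.List.foldl_append_eq_flatMap]
    rw [List.nil_append]
    exact List.flatMap_congr (fun p _ => pvBlock_eq flock p)
  have hdelta : num_rounds_to_skip flock =
      PySem.List.minD ((D.zip R).foldl (pvGapStep flock) []) (fun y => y) 0 := by
    rw [hgapsB, pvGaps_eq flock, ← hDdef, ← hRdef]
    have hminD : ∀ (l : List Int), PySem.List.minD l (fun y => y) 0 = pvMinL l := by
      intro l
      cases l with
      | nil => rfl
      | cons h t =>
        rw [show PySem.List.minD (h :: t) (fun y => y) 0 =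
              (PySem.List.min? (h :: t) (fun y => y)).getD 0 from by rfl,
            PySem.List.min?_id_cons]
        rfl
    rw [hminD]
    exact pvMinL_perm (pvPermInterleave (pvRecGap flock) (pvDonGaps flock) (D.zip R))
  set δ := num_rounds_to_skip flock with hδ
  -- the offset dict lookup
  have hndZ : ((D.zip R).map Prod.fst ++ (D.zip R).map Prod.snd).Nodup := by
    rw [List.map_fst_zip (le_of_eq hlen), List.map_snd_zip (le_of_eq hlen.symm)]
    rw [List.nodup_append]
    exact ⟨hndD, hndR, fun a ha b hb => hdisj a ha b hb⟩
  have hoff : ∀ (k : Int),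
      ((D.zip R).foldl (fun d q => (d.insert q.1 (-δ)).insert q.2 δ) PySem.Dict.empty).getD k 0 =
        if k ∈ D then -δ else if k ∈ R then δ else 0 := by
    intro k
    rw [pvOffGetD δ (D.zip R) hndZ PySem.Dict.empty k,
        List.map_fst_zip (le_of_eq hlen), List.map_snd_zip (le_of_eq hlen.symm),
        PySem.Dict.getD_empty]
  -- assemble
  have ha : advance_simulation old flock =
      (old + δ,
       (find_donors_and_recipients flock).2.foldl
         (fun fl r => PySem.List.pySetD fl r
           ((fun t => t + δ) (PySem.List.pyGetD fl r 0)))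
         ((find_donors_and_recipients flock).1.foldl
           (fun fl d => PySem.List.pySetD fl d
             ((fun t => t - δ) (PySem.List.pyGetD fl d 0))) flock)) := rfl
  rw [ha, hfD, hfR, ← hdelta]
  refine Prod.ext rfl ?_
  have hrangeD : ∀ x ∈ D, 0 ≤ x ∧ x < (flock.length : Int) := fun x hx =>
    ⟨hbndD x hx, by have := hbD x hx; omega⟩
  have hrangeR : ∀ x ∈ R, 0 ≤ x ∧ x < (flock.length : Int) := fun x hx =>
    ⟨le_of_lt (hbndR x hx), hbR x hx⟩
  apply List.ext_getElem?
  intro k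
  rw [pvFoldSet_getElem? (fun t => t + δ) R _
        (by intro x hx; rw [pvFoldSet_length (fun t => t - δ) D flock]; exact hrangeR x hx) hndR k,
      pvFoldSet_getElem? (fun t => t - δ) D flock hrangeD hndD k,
      List.getElem?_map, PySem.List.getElem?_enumerate]
  by_cases hkD : ((k : Int) ∈ D)
  · have hkR : ¬((k : Int) ∈ R) := fun hkR => hdisj _ hkD _ hkR rfl
    cases flock[k]?
    · simp
    · simp [hkD, hkR, hoff, sub_eq_add_neg]
  · by_cases hkR : ((k : Int) ∈ R)
    · cases flock[k]?
      · simp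
      · simp [hkD, hkR, hoff]
    · cases flock[k]?
      · simp
      · simp [hkD, hkR, hoff]
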